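-- pv_equiv track=rewrite | github.com/akabhowmick/leetcode | patterns/Binary Search/2529. Maximum Count of Positive Integer and Negative Integer.py | maximumCount
-- ===== SOURCE A (Python) =====
-- from typing import List
--
-- def maximumCount(nums: List[int]) -> int:
--     def findFirstNonNegative():
--         left, right = 0, len(nums)
--         while left < right:
--             mid = (left + right) // 2
--             if nums[mid] >= 0:
--                 right = mid
--             else:
--                 left = mid + 1
--         return left
--     def findFirstPositive():
--         left, right = 0, len(nums)
--         while left < right:
--             mid = (left + right) // 2
--             if nums[mid] > 0:
--                 right = mid
--             else:
--                 left = mid + 1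
--         return left
--
--     first_non_negative = findFirstNonNegative()
--     first_positive = findFirstPositive()
--
--     negative_count = first_non_negative
--     positive_count = len(nums) - first_positive
--
--     return max(negative_count, positive_count)
-- ===== SOURCE B (Python) =====
-- from typing import List
--
-- def maximumCount(nums: List[int]) -> int:
--     neg = 0
--     pos = 0
--     for x in nums:
--         if x < 0:
--             neg += 1
--         if x > 0:
--             pos += 1
--     return max(neg, pos)
-- ===== Notes on version B (the rewrite author's own statement) =====
-- stated objective: simpler
-- what changed: Replaces the two hand-written binary searches over the sorted array with a single linear pass that counts strictly negative and strictly positive elements directly.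
-- outside the precondition, e.g. on maximumCount([1, -1]): A returns 2, B returns 1
import Mathlib
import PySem

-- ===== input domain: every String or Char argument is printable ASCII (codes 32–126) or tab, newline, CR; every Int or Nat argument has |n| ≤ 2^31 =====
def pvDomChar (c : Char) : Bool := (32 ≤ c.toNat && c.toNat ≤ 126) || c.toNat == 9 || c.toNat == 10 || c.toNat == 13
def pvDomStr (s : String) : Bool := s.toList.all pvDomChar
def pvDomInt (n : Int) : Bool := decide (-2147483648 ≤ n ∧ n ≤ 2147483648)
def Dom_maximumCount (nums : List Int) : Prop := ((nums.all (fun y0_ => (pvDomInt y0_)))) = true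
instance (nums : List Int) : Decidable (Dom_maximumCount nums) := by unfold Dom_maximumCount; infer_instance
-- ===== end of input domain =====

-- B replaces A's two binary searches with one linear counting pass; objective: simpler.
-- Equality is claimed on sorted inputs (Pre_), the problem's stated domain.

-- ===== PORT A =====
-- inner 'findFirstNonNegative': while left < right, mid = (left+right)//2
-- (indices are in range whenever right ≤ len, so getD is exact for nums[mid])
def findFirstNonNegativeA (nums : List Int) (left right : Nat) : Nat :=
  if _h : left < right then
    let mid := (left + right) / 2
    if nums.getD mid 0 ≥ 0 then findFirstNonNegativeA nums left mid
    else findFirstNonNegativeA nums (mid + 1) right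
  else left
termination_by right - left
decreasing_by all_goals omega

-- inner 'findFirstPositive'
def findFirstPositiveA (nums : List Int) (left right : Nat) : Nat :=
  if _h : left < right then
    let mid := (left + right) / 2
    if nums.getD mid 0 > 0 then findFirstPositiveA nums left mid
    else findFirstPositiveA nums (mid + 1) right
  else left
termination_by right - left
decreasing_by all_goals omega

def maximumCount (nums : List Int) : Int :=
  let first_non_negative := findFirstNonNegativeA nums 0 nums.length
  let first_positive := findFirstPositiveA nums 0 nums.length
  let negative_count : Int := (first_non_negative : Int)
  let positive_count : Int := (nums.length : Int) - (first_positive : Int)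
  max negative_count positive_count

-- ===== PORT B =====
def maximumCount_alt (nums : List Int) : Int :=
  let c := nums.foldl
    (fun (p : Int × Int) x =>
      (if x < 0 then p.1 + 1 else p.1, if x > 0 then p.2 + 1 else p.2))
    (0, 0)
  max c.1 c.2

-- ===== PRECONDITION & SPEC =====
-- Pre_ requires the sign pattern of nums to be non-decreasing (all negatives before
-- all non-negatives, all non-positives before all positives): the partition property
-- A's binary searches rely on. It contains every sorted input (the problem's stated
-- domain, LeetCode 2529); on other inputs A's binary-search results are accidental.
def Pre_maximumCount (nums : List Int) : Prop :=
  List.Pairwise (fun a b => (0 ≤ a → 0 ≤ b) ∧ (0 < a → 0 < b)) nums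
instance (nums : List Int) : Decidable (Pre_maximumCount nums) := by unfold Pre_maximumCount; infer_instance
def pvWitness_maximumCount : List Int := [-3, -1, 0, 2, 5]

def Spec_maximumCount (nums : List Int) (out : Int) : Prop := out = maximumCount_alt nums
instance (nums : List Int) (out : Int) : Decidable (Spec_maximumCount nums out) := by unfold Spec_maximumCount; infer_instance

-- ===== CLAIM (what is proved, stated in full; the proofs are below) =====
def Claim_equal_maximumCount : Prop := ∀ (nums : List Int), Dom_maximumCount nums → Pre_maximumCount nums → Spec_maximumCount nums (maximumCount nums)

-- ===== LEMMAS AND PROOFS =====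

-- sign-monotonicity transported to getD-indexed form
lemma sign_mono {nums : List Int}
    (h : List.Pairwise (fun a b => (0 ≤ a → 0 ≤ b) ∧ (0 < a → 0 < b)) nums)
    {i j : Nat} (hij : i ≤ j) (hj : j < nums.length) :
    (0 ≤ nums.getD i 0 → 0 ≤ nums.getD j 0) ∧ (0 < nums.getD i 0 → 0 < nums.getD j 0) := by
  rcases Nat.lt_or_eq_of_le hij with hlt | rfl
  · have := (List.pairwise_iff_getElem.mp h) i j (by omega) hj hlt
    simpa [List.getD_eq_getElem, Nat.lt_of_le_of_lt hij hj, hj] using this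
  · exact ⟨id, id⟩

-- binary-search invariant for findFirstNonNegativeA
lemma ffnn_spec (nums : List Int)
    (h : List.Pairwise (fun a b => (0 ≤ a → 0 ≤ b) ∧ (0 < a → 0 < b)) nums) :
    ∀ n left right, right - left ≤ n → left ≤ right → right ≤ nums.length →
    (∀ i, i < left → nums.getD i 0 < 0) →
    (∀ i, right ≤ i → i < nums.length → 0 ≤ nums.getD i 0) →
    (∀ i, i < findFirstNonNegativeA nums left right → nums.getD i 0 < 0) ∧
    (∀ i, findFirstNonNegativeA nums left right ≤ i → i < nums.length → 0 ≤ nums.getD i 0) := by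
  intro n
  induction n with
  | zero =>
    intro l r hn hlr hrl hL hR
    have : l = r := by omega
    subst this
    rw [findFirstNonNegativeA]
    simp only [Nat.lt_irrefl, dif_neg, not_false_iff]
    exact ⟨hL, hR⟩
  | succ n ih =>
    intro l r hn hlr hrl hL hR
    rw [findFirstNonNegativeA]
    by_cases hc : l < r
    · simp only [hc, dif_pos]
      set mid := (l + r) / 2 with hmid
      have hm1 : l ≤ mid := by omega
      have hm2 : mid < r := by omega
      by_cases hv : nums.getD mid 0 ≥ 0
      · simp only [hv, if_pos]
        exact ih l mid (by omega) (by omega) (by omega) hL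
          (fun i hi hlen => (sign_mono h hi hlen).1 hv)
      · simp only [hv, if_neg, not_false_iff]
        refine ih (mid + 1) r (by omega) (by omega) hrl ?_ hR
        intro i hi
        by_contra hcon
        exact hv ((sign_mono h (i := i) (j := mid) (by omega) (by omega)).1 (by omega))
    · simp only [hc, dif_neg, not_false_iff]
      have : l = r := by omega
      subst this
      exact ⟨hL, hR⟩

-- binary-search invariant for findFirstPositiveA
lemma ffp_spec (nums : List Int)
    (h : List.Pairwise (fun a b => (0 ≤ a → 0 ≤ b) ∧ (0 < a → 0 < b)) nums) :
    ∀ n left right, right - left ≤ n → left ≤ right → right ≤ nums.length →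
    (∀ i, i < left → nums.getD i 0 ≤ 0) →
    (∀ i, right ≤ i → i < nums.length → 0 < nums.getD i 0) →
    findFirstPositiveA nums left right ≤ nums.length ∧
    (∀ i, i < findFirstPositiveA nums left right → nums.getD i 0 ≤ 0) ∧
    (∀ i, findFirstPositiveA nums left right ≤ i → i < nums.length → 0 < nums.getD i 0) := by
  intro n
  induction n with
  | zero =>
    intro l r hn hlr hrl hL hR
    have : l = r := by omega
    subst this
    rw [findFirstPositiveA]
    simp only [Nat.lt_irrefl, dif_neg, not_false_iff]
    exact ⟨hrl, hL, hR⟩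
  | succ n ih =>
    intro l r hn hlr hrl hL hR
    rw [findFirstPositiveA]
    by_cases hc : l < r
    · simp only [hc, dif_pos]
      set mid := (l + r) / 2 with hmid
      have hm1 : l ≤ mid := by omega
      have hm2 : mid < r := by omega
      by_cases hv : nums.getD mid 0 > 0
      · simp only [hv, if_pos]
        exact ih l mid (by omega) (by omega) (by omega) hL
          (fun i hi hlen => (sign_mono h hi hlen).2 hv)
      · simp only [hv, if_neg, not_false_iff]
        refine ih (mid + 1) r (by omega) (by omega) hrl ?_ hR
        intro i hi
        by_contra hcon
        exact hv ((sign_mono h (i := i) (j := mid) (by omega) (by omega)).2 (by omega))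
    · simp only [hc, dif_neg, not_false_iff]
      have : l = r := by omega
      subst this
      exact ⟨hrl, hL, hR⟩

-- the same bound for the first search
lemma ffnn_le (nums : List Int) :
    ∀ n left right, right - left ≤ n → left ≤ right →
    findFirstNonNegativeA nums left right ≤ right := by
  intro n
  induction n with
  | zero =>
    intro l r hn hlr
    have : l = r := by omega
    subst this
    rw [findFirstNonNegativeA]; simp
  | succ n ih =>
    intro l r hn hlr
    rw [findFirstNonNegativeA]
    by_cases hc : l < r
    · simp only [hc, dif_pos]
      by_cases hv : nums.getD ((l + r) / 2) 0 ≥ 0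
      · simp only [hv, if_pos]
        exact le_trans (ih l ((l + r) / 2) (by omega) (by omega)) (by omega)
      · simp only [hv, if_neg, not_false_iff]
        exact ih ((l + r) / 2 + 1) r (by omega) (by omega)
    · simp only [hc, dif_neg, not_false_iff]; omega

-- countP of a ⟨true-prefix, false-suffix⟩ split equals the split point
lemma countP_prefix (p : Int → Bool) :
    ∀ (nums : List Int) (k : Nat), k ≤ nums.length →
    (∀ i, i < k → p (nums.getD i 0) = true) →
    (∀ i, k ≤ i → i < nums.length → p (nums.getD i 0) = false) →
    nums.countP p = k := by
  intro nums
  induction nums with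
  | nil => intro k hk _ _; simp at hk ⊢; omega
  | cons x xs ih =>
    intro k hk h1 h2
    cases k with
    | zero =>
      have hx : p x = false := by simpa using h2 0 (by omega) (by simp)
      have : xs.countP p = 0 := by
        apply ih 0 (by omega) (by intro i hi; omega)
        intro i _ hi
        simpa using h2 (i + 1) (by omega) (by simpa using Nat.succ_lt_succ hi)
      simp [hx, this]
    | succ k =>
      have hx : p x = true := by simpa using h1 0 (by omega)
      have : xs.countP p = k := by
        apply ih k (by simpa using hk)
        · intro i hi; simpa using h1 (i + 1) (by omega)
        · intro i hki hi
          simpa using h2 (i + 1) (by omega) (by simpa using Nat.succ_lt_succ hi)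
      simp [hx, this]

-- complementary form: false-prefix, true-suffix
lemma countP_suffix (p : Int → Bool) (nums : List Int) (k : Nat) (hk : k ≤ nums.length)
    (h1 : ∀ i, i < k → p (nums.getD i 0) = false)
    (h2 : ∀ i, k ≤ i → i < nums.length → p (nums.getD i 0) = true) :
    nums.countP p = nums.length - k := by
  have hneg : nums.countP (fun x => !p x) = k := by
    apply countP_prefix (fun x => !p x) nums k hk
    · intro i hi; have h := h1 i hi; simp [List.getD] at h ⊢; simp [h]
    · intro i hki hi; have h := h2 i hki hi; simp [List.getD] at h ⊢; simp [h]
  have htot := List.length_eq_countP_add_countP (p := p) (l := nums)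
  have hcast : (fun a => decide (¬ p a = true)) = (fun x => !p x) := by
    funext x; cases p x <;> simp
  rw [hcast] at htot
  omega

-- B's fold computes the two counts
lemma foldB (nums : List Int) : ∀ (a b : Int),
    nums.foldl
      (fun (p : Int × Int) x =>
        (if x < 0 then p.1 + 1 else p.1, if x > 0 then p.2 + 1 else p.2))
      (a, b)
    = (a + (nums.countP (fun x => decide (x < 0)) : Int),
       b + (nums.countP (fun x => decide (x > 0)) : Int)) := by
  induction nums with
  | nil => intro a b; simp
  | cons x xs ih =>
    intro a b
    simp only [List.foldl_cons, List.countP_cons, ih]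
    by_cases h1 : x < 0 <;> by_cases h2 : x > 0 <;>
      simp [h1, h2, Prod.ext_iff] <;> omega

-- ===== VERDICT (by name: the statement is the Claim_ definition above) =====
theorem maximumCount_spec : Claim_equal_maximumCount := by
  intro nums _hdom hpre
  unfold Spec_maximumCount maximumCount maximumCount_alt
  have hA := ffnn_spec nums hpre nums.length 0 nums.length (by omega) (by omega) (le_refl _)
    (by intro i hi; omega) (by intro i h1 h2; omega)
  have hAle := ffnn_le nums nums.length 0 nums.length (by omega) (by omega)
  have hB := ffp_spec nums hpre nums.length 0 nums.length (by omega) (by omega) (le_refl _)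
    (by intro i hi; omega) (by intro i h1 h2; omega)
  have hcNeg : nums.countP (fun x => decide (x < 0)) = findFirstNonNegativeA nums 0 nums.length := by
    apply countP_prefix _ nums _ hAle
    · intro i hi; simpa using hA.1 i hi
    · intro i h1 h2; simpa using hA.2 i h1 h2
  have hcPos : nums.countP (fun x => decide (x > 0)) = nums.length - findFirstPositiveA nums 0 nums.length := by
    apply countP_suffix _ nums _ hB.1
    · intro i hi; simpa using hB.2.1 i hi
    · intro i h1 h2; simpa using hB.2.2 i h1 h2
  simp only [foldB, hcNeg, hcPos, Int.zero_add]
  have hle := hB.1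
  congr 1
  omega
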